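-- pv_equiv track=rewrite | github.com/mawi13/coda-automation | services/testnet-points/LeaderboardUpload/upload.py | metrics_to_values
-- ===== SOURCE A (Python) =====
-- def metrics_to_values(metrics_order, metrics):
--     def mapUsers(username):
--         user_values = [metrics.get(username, {}).get(metrics_name)
--                        for metrics_name in metrics_order]
--         user_values.insert(0, username)
--         return user_values
--
--     values = [mapUsers(users) for users in sorted(metrics.keys())]
--     values.insert(0, [''] + metrics_order)
--     return values
-- ===== SOURCE B (Python) =====
-- def metrics_to_values(metrics_order, metrics):
--     # Column-major build: label column + one column per metric, then transpose.
--     sorted_users = sorted(metrics)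
--     col0 = [''] + sorted_users
--     cols = [[name] + [metrics[u].get(name) for u in sorted_users]
--             for name in metrics_order]
--     return [list(row) for row in zip(col0, *cols)]
-- ===== Notes on version B (the rewrite author's own statement) =====
-- stated objective: alternative
-- what changed: B builds the table column-major (label column plus one column per metric name) and transposes with zip, instead of A's row-major build that constructs each user row and inserts the header.
import Mathlib
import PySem

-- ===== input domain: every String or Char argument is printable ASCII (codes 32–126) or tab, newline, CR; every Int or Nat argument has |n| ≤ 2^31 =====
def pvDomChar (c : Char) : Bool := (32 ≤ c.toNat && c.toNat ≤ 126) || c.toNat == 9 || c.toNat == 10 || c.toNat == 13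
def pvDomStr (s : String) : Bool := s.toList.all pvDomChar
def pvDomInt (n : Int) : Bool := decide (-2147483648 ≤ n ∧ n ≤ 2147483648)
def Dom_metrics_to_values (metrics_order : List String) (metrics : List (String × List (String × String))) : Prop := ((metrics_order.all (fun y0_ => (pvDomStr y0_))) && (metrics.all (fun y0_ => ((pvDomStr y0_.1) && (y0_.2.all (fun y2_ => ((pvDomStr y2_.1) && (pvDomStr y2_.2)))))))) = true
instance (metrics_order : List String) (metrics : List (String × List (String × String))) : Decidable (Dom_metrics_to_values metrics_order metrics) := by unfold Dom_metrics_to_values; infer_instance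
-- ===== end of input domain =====

-- B builds the table column-major (label column + one column per metric) and transposes with zip; alternative decomposition, same cost.


-- ===== PORT A =====
def metrics_to_values (metrics_order : List String) (metrics : List (String × List (String × String))) : List (List (Option String)) :=
  let d := PySem.Dict.ofList metrics
  let mapUsers := fun (username : String) =>
    let user_values := metrics_order.map
      (fun metrics_name => (PySem.Dict.ofList (d.getD username [])).get? metrics_name)
    some username :: user_values
  let values := (PySem.List.sorted d.keys (fun x => x) false).map mapUsers
  (some "" :: metrics_order.map some) :: values

-- ===== PORT B =====
-- zip(col0, *cols) followed by list(row): emit rows while every column is nonempty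
def pvZipRows : List (Option String) → List (List (Option String)) → List (List (Option String))
  | [], _ => []
  | x :: xs, cols =>
    if cols.all (fun c => !c.isEmpty) then
      (x :: cols.map (fun c => c.headD none)) :: pvZipRows xs (cols.map List.tail)
    else []

def metrics_to_values_alt (metrics_order : List String) (metrics : List (String × List (String × String))) : List (List (Option String)) :=
  let d := PySem.Dict.ofList metrics
  let sorted_users := PySem.List.sorted d.keys (fun x => x) false
  let col0 := some "" :: sorted_users.map some
  let cols := metrics_order.map (fun name =>
    some name :: sorted_users.map (fun u => (PySem.Dict.ofList ((d.get? u).getD [])).get? name))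
  pvZipRows col0 cols

-- ===== PRECONDITION & SPEC =====
def Spec_metrics_to_values (metrics_order : List String) (metrics : List (String × List (String × String))) (out : List (List (Option String))) : Prop := out = metrics_to_values_alt metrics_order metrics
instance (metrics_order : List String) (metrics : List (String × List (String × String))) (out : List (List (Option String))) : Decidable (Spec_metrics_to_values metrics_order metrics out) := by unfold Spec_metrics_to_values; infer_instance

-- ===== CLAIM (what is proved, stated in full; the proofs are below) =====
def Claim_equal_metrics_to_values : Prop := ∀ (metrics_order : List String) (metrics : List (String × List (String × String))), Dom_metrics_to_values metrics_order metrics → Spec_metrics_to_values metrics_order metrics (metrics_to_values metrics_order metrics)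

-- ===== LEMMAS AND PROOFS =====

-- transposing columns aligned on the same user list yields the row-major table
theorem pvZipRows_cols (f : String → String → Option String) (mo : List String) :
    ∀ us : List String,
      pvZipRows (us.map some) (mo.map (fun n => us.map (fun u => f u n)))
        = us.map (fun u => some u :: mo.map (fun n => f u n)) := by
  intro us
  induction us with
  | nil => simp [pvZipRows]
  | cons u us ih =>
    simp only [List.map_cons, pvZipRows, List.map_map]
    rw [if_pos]
    · simp only [Function.comp_def, List.headD, List.tail_cons]
      rw [ih]
    · simp [List.all_eq_true]

-- one header row on top of the transposed columns
theorem pvZipRows_header (names us : List String) (f : String → String → Option String) :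
    pvZipRows (some "" :: us.map some)
        (names.map (fun n => some n :: us.map (fun u => f u n)))
      = (some "" :: names.map some)
          :: us.map (fun u => some u :: names.map (fun n => f u n)) := by
  simp only [pvZipRows, List.map_map]
  rw [if_pos]
  · simp only [Function.comp_def, List.headD, List.tail_cons]
    rw [pvZipRows_cols]
  · simp [List.all_eq_true]

theorem metrics_to_values_spec : Claim_equal_metrics_to_values := by
  intro metrics_order metrics _
  unfold Spec_metrics_to_values metrics_to_values metrics_to_values_alt
  simp only []
  rw [pvZipRows_header metrics_order
      (PySem.List.sorted (PySem.Dict.ofList metrics).keys (fun x => x) false)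
      (fun u n => (PySem.Dict.ofList (((PySem.Dict.ofList metrics).get? u).getD [])).get? n)]
  rfl
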